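-- pv_equiv track=rewrite | github.com/mikemoldovan/pangenomes_and_species | alignment_fusion.py | cat_align_dicts
-- ===== SOURCE A (Python) =====
-- def cat_align_dicts(aldict1, aldict2):
-- 	if not aldict1:
-- 		return aldict2
-- 	if not aldict2:
-- 		return aldict1
-- 	cat_dict = dict()
-- 	first = True
-- 	for k in aldict1.keys():
-- 		l1 = len(aldict1[k])
-- 		break
-- 	for k in aldict2.keys():
-- 		l2 = len(aldict2[k])
-- 		break
--
-- 	for k in aldict1.keys():
-- 		if k in aldict2.keys():
-- 			cat_dict[k] = aldict1[k] + aldict2[k]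
-- 		else:
-- 			cat_dict[k] = aldict1[k] + '-'*l2
-- 	for k in aldict2.keys():
-- 		if k not in aldict1.keys():
-- 			cat_dict[k] = '-'*l1 + aldict2[k]
-- 	return cat_dict
-- ===== SOURCE B (Python) =====
-- def cat_align_dicts(aldict1, aldict2):
--     if not aldict1:
--         return aldict2
--     if not aldict2:
--         return aldict1
--     l1 = len(next(iter(aldict1.values())))
--     l2 = len(next(iter(aldict2.values())))
--     # pad-then-patch: provisionally pad every aldict1 row with gaps, then one
--     # pass over aldict2 replaces the provisional padding (or prepends gaps).
--     res = {k: v + '-' * l2 for k, v in aldict1.items()}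
--     for k, v in aldict2.items():
--         if k in res:
--             res[k] = res[k][:len(res[k]) - l2] + v
--         else:
--             res[k] = '-' * l1 + v
--     return res
-- ===== Notes on version B (the rewrite author's own statement) =====
-- stated objective: alternative
-- what changed: Instead of A's two loops that test membership in the other dict and assemble each final value directly, B first builds a provisional dict padding every aldict1 row with gaps, then a single pass over aldict2's items patches it in place: for keys already present it slices off the provisional gap padding and appends the real row, for new keys it prepends gaps; no membership test against aldict2 is ever made.
import Mathlib
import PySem

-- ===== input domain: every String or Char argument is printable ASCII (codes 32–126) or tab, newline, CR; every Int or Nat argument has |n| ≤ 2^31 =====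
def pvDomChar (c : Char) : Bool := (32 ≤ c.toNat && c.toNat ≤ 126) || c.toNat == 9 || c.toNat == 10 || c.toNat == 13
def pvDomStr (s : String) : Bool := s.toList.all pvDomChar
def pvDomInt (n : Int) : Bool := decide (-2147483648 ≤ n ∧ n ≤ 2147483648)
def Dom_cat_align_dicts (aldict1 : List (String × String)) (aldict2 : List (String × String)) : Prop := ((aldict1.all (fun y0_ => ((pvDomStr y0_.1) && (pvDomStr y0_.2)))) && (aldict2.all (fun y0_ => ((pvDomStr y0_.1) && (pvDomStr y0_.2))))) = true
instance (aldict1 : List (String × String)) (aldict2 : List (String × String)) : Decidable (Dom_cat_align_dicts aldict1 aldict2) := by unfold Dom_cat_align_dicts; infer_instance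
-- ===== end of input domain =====

-- B replaces A's two membership-branching assembly loops by pad-then-patch: it first
-- pads every aldict1 row with gaps, then one pass over aldict2's items patches the
-- provisional padding in place (slicing it off) or prepends gaps for new keys;
-- objective: alternative (same cost, no speed claim).

-- '-' * l for l ≥ 0 (exact: lengths here are string lengths, never negative)
def pvGaps (l : Int) : String := String.ofList (List.replicate l.toNat '-')

-- res[k][:len(res[k]) - l2] + v  (B's in-place patch of a provisional row w)
def pvPatch (l2 : Int) (w v : String) : String :=
  PySem.Str.slice w none (some (PySem.Str.len w - l2)) ++ v

-- ===== PORT A =====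
def cat_align_dicts (aldict1 : List (String × String)) (aldict2 : List (String × String)) : List (String × String) :=
  let d1 := PySem.Dict.ofList aldict1
  let d2 := PySem.Dict.ofList aldict2
  if d1.items.isEmpty then d2.items
  else if d2.items.isEmpty then d1.items
  else
    -- for k in aldict1.keys(): l1 = len(aldict1[k]); break   (dict is nonempty here)
    let l1 := PySem.Str.len (d1.values.headD "")
    let l2 := PySem.Str.len (d2.values.headD "")
    let cd := d1.keys.foldl (fun cd k =>
      if d2.contains k then cd.insert k (d1.getD k "" ++ d2.getD k "")
      else cd.insert k (d1.getD k "" ++ pvGaps l2)) PySem.Dict.empty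
    let cd := d2.keys.foldl (fun cd k =>
      if !(d1.contains k) then cd.insert k (pvGaps l1 ++ d2.getD k "") else cd) cd
    cd.items

-- ===== PORT B =====
def cat_align_dicts_alt (aldict1 : List (String × String)) (aldict2 : List (String × String)) : List (String × String) :=
  let d1 := PySem.Dict.ofList aldict1
  let d2 := PySem.Dict.ofList aldict2
  if d1.items.isEmpty then d2.items
  else if d2.items.isEmpty then d1.items
  else
    let l1 := PySem.Str.len (d1.values.headD "")
    let l2 := PySem.Str.len (d2.values.headD "")
    -- res = {k: v + '-'*l2 for k, v in aldict1.items()}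
    let res0 := PySem.Dict.ofList (d1.items.map (fun p => (p.1, p.2 ++ pvGaps l2)))
    -- for k, v in aldict2.items(): patch in place
    let res := d2.items.foldl (fun r p =>
      if r.contains p.1 then r.insert p.1 (pvPatch l2 (r.getD p.1 "") p.2)
      else r.insert p.1 (pvGaps l1 ++ p.2)) res0
    res.items

-- ===== PRECONDITION & SPEC =====
def Spec_cat_align_dicts (aldict1 : List (String × String)) (aldict2 : List (String × String)) (out : List (String × String)) : Prop := out = cat_align_dicts_alt aldict1 aldict2
instance (aldict1 : List (String × String)) (aldict2 : List (String × String)) (out : List (String × String)) : Decidable (Spec_cat_align_dicts aldict1 aldict2 out) := by unfold Spec_cat_align_dicts; infer_instance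

-- ===== CLAIM (what is proved, stated in full; the proofs are below) =====
def Claim_equal_cat_align_dicts : Prop := ∀ (aldict1 : List (String × String)) (aldict2 : List (String × String)), Dom_cat_align_dicts aldict1 aldict2 → Spec_cat_align_dicts aldict1 aldict2 (cat_align_dicts aldict1 aldict2)

-- ===== LEMMAS AND PROOFS =====

theorem pv_mem_keys_contains {d : PySem.Dict String String} {k : String}
    (h : k ∈ d.keys) : d.contains k = true := by
  rw [PySem.Dict.contains_eq_decide_mem_keys]; simpa using h

theorem pv_not_contains_of_filter {d : PySem.Dict String String} {k : String} {ks : List String}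
    (h : k ∈ ks.filter (fun k => !(d.contains k))) : d.contains k = false := by
  have := List.of_mem_filter h
  simpa using this

theorem pv_lookup_eq_find {α β : Type} [BEq α] [LawfulBEq α] (l : List (α × β)) (k : α) :
    List.lookup k l = Option.map (fun x => x.2) (List.find? (fun p => p.1 == k) l) := by
  induction l with
  | nil => simp
  | cons p t ih =>
    rw [List.lookup_cons]
    by_cases h : k = p.1
    · subst h; simp
    · have h1 : (k == p.1) = false := by simp [h]
      have h2 : (p.1 == k) = false := by simp [Ne.symm h]
      simp [h1, h2, ih]

theorem pv_lookup_items_eq_get? (d : PySem.Dict String String) (k : String) :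
    List.lookup k d.items = d.get? k := by
  rw [pv_lookup_eq_find]
  rfl

theorem pv_len_nonneg (s : String) : 0 ≤ PySem.Str.len s := by
  rw [PySem.Str.len_eq]; exact Int.natCast_nonneg _

theorem pv_patch_pad (w v : String) (l2 : Int) (h : 0 ≤ l2) :
    pvPatch l2 (w ++ pvGaps l2) v = w ++ v := by
  apply String.toList_inj.mp
  have hg : (pvGaps l2).toList = List.replicate l2.toNat '-' := by
    simp [pvGaps]
  have hlen : PySem.Str.len (w ++ pvGaps l2) - l2 = (w.toList.length : Int) := by
    rw [PySem.Str.len_eq]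
    rw [String.toList_append, hg]
    simp
    omega
  unfold pvPatch
  rw [String.toList_append]
  rw [hlen]
  have : (PySem.Str.slice (w ++ pvGaps l2) none (some ((w.toList.length : Int)))).toList
      = PySem.List.slice (w ++ pvGaps l2).toList none (some ((w.toList.length : Int))) := by
    simp [pysem]
  rw [this, PySem.List.slice_to _ (by positivity)]
  rw [String.toList_append, hg]
  simp

-- B's patching loop, characterized: entries of r are updated in place by the first
-- (unique) matching pair of l, pairs of l with fresh keys are appended.
theorem pv_lookup_cons_ne {β : Type} {a k : String} {b : β} {es : List (String × β)}
    (h : a ≠ k) : List.lookup a ((k, b) :: es) = List.lookup a es := by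
  rw [List.lookup_cons]
  have : (a == k) = false := by simp [h]
  simp [this]

theorem pv_lookup_cons_self {β : Type} {k : String} {b : β} {es : List (String × β)} :
    List.lookup k ((k, b) :: es) = some b := by
  rw [List.lookup_cons]; simp

-- B's patching loop, characterized: entries of r are updated in place by the first
-- (unique) matching pair of l, pairs of l with fresh keys are appended.
theorem pv_foldB_items (g1 : String) (l2 : Int) (l : List (String × String))
    (r : PySem.Dict String String) (hr : r.keys.Nodup) (hl : (l.map Prod.fst).Nodup) :
    (l.foldl (fun r p =>
      if r.contains p.1 then r.insert p.1 (pvPatch l2 (r.getD p.1 "") p.2)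
      else r.insert p.1 (g1 ++ p.2)) r).items
    = r.items.map (fun q => match List.lookup q.1 l with
        | some v => (q.1, pvPatch l2 q.2 v)
        | none => q)
      ++ (l.filter (fun p => !(r.contains p.1))).map (fun p => (p.1, g1 ++ p.2)) := by
  induction l generalizing r with
  | nil => simp
  | cons p t ih =>
    obtain ⟨k, v⟩ := p
    have hk : k ∉ t.map Prod.fst := by
      simp only [List.map_cons, List.nodup_cons] at hl
      exact hl.1
    have ht : (t.map Prod.fst).Nodup := by
      simp only [List.map_cons, List.nodup_cons] at hl
      exact hl.2
    have hne : ∀ x ∈ t, x.1 ≠ k := by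
      intro x hx he
      apply hk
      have : x.1 ∈ t.map Prod.fst := List.mem_map_of_mem hx
      rwa [he] at this
    have hlookt : List.lookup k t = none := by
      rw [pv_lookup_eq_find]
      rw [List.find?_eq_none.mpr]
      · rfl
      · intro q hq hbeq
        exact hne q hq (by simpa using hbeq)
    simp only [List.foldl_cons]
    by_cases hc : r.contains k
    · -- key already present: in-place overwrite
      simp only [hc, if_true]
      set r' := r.insert k (pvPatch l2 (r.getD k "") v) with hr'
      have hr'n : r'.keys.Nodup := PySem.Dict.nodup_keys_insert _ _ _ hr
      rw [ih r' hr'n ht]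
      have hitems : r'.items = r.items.map (fun q => if (q.1 == k) = true then (k, pvPatch l2 (r.getD k "") v) else q) :=
        PySem.Dict.items_insert_of_contains r _ hc
      have hcontains : ∀ x ∈ t, (!(r'.contains x.1)) = (!(r.contains x.1)) := by
        intro x hx
        rw [hr', PySem.Dict.contains_insert]
        have : (x.1 == k) = false := by simp [hne x hx]
        rw [this, Bool.false_or]
      congr 1
      · rw [hitems, List.map_map]
        apply List.map_congr_left
        rintro ⟨qk, qv⟩ hq
        by_cases hqk : qk = k
        · subst hqk
          have hq2 : r.getD qk "" = qv := PySem.Dict.getD_of_mem_items r hq hr ""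
          simp only [Function.comp, beq_self_eq_true, if_true]
          rw [pv_lookup_cons_self, hlookt]
          simp [hq2]
        · have hb : (qk == k) = false := by simp [hqk]
          simp only [Function.comp, hb, Bool.false_eq_true, if_false]
          rw [pv_lookup_cons_ne hqk]
      · rw [List.filter_cons]
        have : (!(r.contains k)) = false := by simp [hc]
        rw [this, if_neg (by simp)]
        apply congrArg
        exact List.filter_congr hcontains
    · -- fresh key: appended
      have hnotmem : k ∉ r.keys := by
        intro hmm
        rw [pv_mem_keys_contains hmm] at hc
        exact hc rfl
      simp only [hc, if_false, Bool.false_eq_true]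
      set r' := r.insert k (g1 ++ v) with hr'
      have hr'n : r'.keys.Nodup := PySem.Dict.nodup_keys_insert _ _ _ hr
      rw [ih r' hr'n ht]
      have hitems : r'.items = r.items ++ [(k, g1 ++ v)] :=
        PySem.Dict.items_insert_of_not_contains r _ (by simpa using hc)
      have hcontains : ∀ x ∈ t, (!(r'.contains x.1)) = (!(r.contains x.1)) := by
        intro x hx
        rw [hr', PySem.Dict.contains_insert]
        have : (x.1 == k) = false := by simp [hne x hx]
        rw [this, Bool.false_or]
      rw [hitems, List.map_append, List.filter_cons]
      have hck : (!(r.contains k)) = true := by simp [hc]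
      rw [hck, if_pos rfl]
      simp only [List.map_cons]
      rw [List.append_assoc]
      congr 1
      · apply List.map_congr_left
        rintro ⟨qk, qv⟩ hq
        have hqk : qk ≠ k := by
          intro he
          apply hnotmem
          rw [← he]
          have : qk ∈ r.items.map Prod.fst := List.mem_map_of_mem hq
          exact this
        rw [pv_lookup_cons_ne hqk]
      · simp only [hlookt, List.map_nil, List.singleton_append]
        exact congrArg _ (congrArg _ (List.filter_congr hcontains))

theorem cat_align_dicts_main (aldict1 aldict2 : List (String × String)) :
    cat_align_dicts aldict1 aldict2 = cat_align_dicts_alt aldict1 aldict2 := by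
  unfold cat_align_dicts cat_align_dicts_alt
  set d1 := PySem.Dict.ofList aldict1 with hd1
  set d2 := PySem.Dict.ofList aldict2 with hd2
  by_cases h1 : d1.items.isEmpty
  · simp [h1]
  by_cases h2 : d2.items.isEmpty
  · simp [h1, h2]
  simp only [h1, h2, if_false, Bool.false_eq_true]
  set l1 := PySem.Str.len (d1.values.headD "") with hl1
  set l2 := PySem.Str.len (d2.values.headD "") with hl2
  have hn1 : d1.keys.Nodup := PySem.Dict.nodup_keys_ofList aldict1
  have hn2 : d2.keys.Nodup := PySem.Dict.nodup_keys_ofList aldict2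
  -- ===== A's result, in closed form =====
  set V : String → String := fun k =>
    if d2.contains k then d1.getD k "" ++ d2.getD k "" else d1.getD k "" ++ pvGaps l2 with hV
  have hfold1 : d1.keys.foldl (fun cd k =>
      if d2.contains k then cd.insert k (d1.getD k "" ++ d2.getD k "")
      else cd.insert k (d1.getD k "" ++ pvGaps l2)) PySem.Dict.empty
      = d1.keys.foldl (fun cd k => cd.insert k (V k)) PySem.Dict.empty := by
    congr 1
    funext cd k
    by_cases h : d2.contains k <;> simp [hV, h]
  set A1 := d1.keys.foldl (fun cd k => cd.insert k (V k)) PySem.Dict.empty with hA1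
  have hA1items : A1.items = d1.keys.map (fun k => (k, V k)) := by
    rw [hA1, PySem.Dict.items_foldl_insert_fresh d1.keys (fun k => k) V PySem.Dict.empty
      (fun a _ => PySem.Dict.contains_empty a) (by simpa using hn1)]
    rfl
  have hA1keys : A1.keys = d1.keys := by
    show A1.items.map (·.1) = d1.keys
    rw [hA1items]; simp [Function.comp_def]
  set ks2 := d2.keys.filter (fun k => !(d1.contains k)) with hks2
  have hks2n : ks2.Nodup := hn2.filter _
  have hfresh : ∀ a ∈ ks2, A1.contains a = false := by
    intro a ha
    have hnd1 : d1.contains a = false := pv_not_contains_of_filter ha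
    rw [PySem.Dict.contains_eq_decide_mem_keys, hA1keys]
    have : a ∉ d1.keys := by
      intro hmem
      rw [pv_mem_keys_contains hmem] at hnd1; exact Bool.true_eq_false.mp hnd1
    simpa using this
  have hfold2 : d2.keys.foldl (fun cd k =>
      if !(d1.contains k) then cd.insert k (pvGaps l1 ++ d2.getD k "") else cd) A1
      = ks2.foldl (fun cd k => cd.insert k (pvGaps l1 ++ d2.getD k "")) A1 := by
    rw [hks2, PySem.List.foldl_if_eq_foldl_filter]
  have hA2items : (ks2.foldl (fun cd k => cd.insert k (pvGaps l1 ++ d2.getD k "")) A1).items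
      = A1.items ++ ks2.map (fun k => (k, pvGaps l1 ++ d2.getD k "")) := by
    rw [PySem.Dict.items_foldl_insert_fresh ks2 (fun k => k) (fun k => pvGaps l1 ++ d2.getD k "") A1
      hfresh (by simpa using hks2n)]
  rw [hfold1, hfold2, hA2items, hA1items]
  -- ===== B's result, in closed form =====
  set res0 := PySem.Dict.ofList (d1.items.map (fun p => (p.1, p.2 ++ pvGaps l2))) with hres0
  have hres0items : res0.items = d1.items.map (fun p => (p.1, p.2 ++ pvGaps l2)) := by
    rw [hres0]
    show ((d1.items.map (fun p => (p.1, p.2 ++ pvGaps l2))).foldl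
        (fun d p => d.insert p.1 p.2) PySem.Dict.empty).items = _
    rw [PySem.Dict.items_foldl_insert_fresh (d1.items.map (fun p => (p.1, p.2 ++ pvGaps l2))) (fun p => p.1) (fun p => p.2) PySem.Dict.empty
      (fun a _ => PySem.Dict.contains_empty a.1)
      (by rw [List.map_map]; simpa [Function.comp_def] using hn1)]
    simp [Function.comp_def]
    rfl
  have hres0keys : res0.keys = d1.keys := by
    show res0.items.map (·.1) = d1.keys
    rw [hres0items, List.map_map]
    simp [Function.comp_def]
    rfl
  have hres0n : res0.keys.Nodup := by rw [hres0keys]; exact hn1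
  have hl : (d2.items.map Prod.fst).Nodup := hn2
  rw [pv_foldB_items (pvGaps l1) l2 d2.items res0 hres0n hl]
  -- compare the two segments
  congr 1
  · -- updated d1 entries
    rw [hres0items, List.map_map]
    rw [PySem.Dict.items_eq_map_keys d1 hn1 "", List.map_map]
    apply List.map_congr_left
    intro k hk
    simp only [Function.comp]
    rw [pv_lookup_items_eq_get?]
    cases hg : d2.get? k with
    | some v =>
      have hc2 : d2.contains k = true := by
        rw [PySem.Dict.contains_eq_isSome_get?, hg]; rfl
      have hv : d2.getD k "" = v := PySem.Dict.getD_of_get?_eq_some _ _ hg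
      have hpatch : pvPatch l2 (d1.getD k "" ++ pvGaps l2) v = d1.getD k "" ++ v :=
        pv_patch_pad _ _ _ (pv_len_nonneg _)
      simp [hV, hc2, hv, hpatch]
    | none =>
      have hc2 : d2.contains k = false := by
        rw [PySem.Dict.contains_eq_isSome_get?, hg]; rfl
      simp [hV, hc2]
  · -- appended d2-only entries
    rw [PySem.Dict.items_eq_map_keys d2 hn2 "", List.filter_map, List.map_map, hks2]
    have hpred : ∀ x ∈ d2.keys,
        ((fun p => !(res0.contains p.1)) ∘ (fun k => (k, d2.getD k ""))) x = (!(d1.contains x)) := by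
      intro x _
      simp only [Function.comp]
      rw [PySem.Dict.contains_eq_decide_mem_keys, hres0keys, ← PySem.Dict.contains_eq_decide_mem_keys]
    rw [List.filter_congr hpred]
    apply List.map_congr_left
    intro k _
    simp [Function.comp]

-- ===== VERDICT (by name: the statement is the Claim_ definition above) =====
theorem cat_align_dicts_spec : Claim_equal_cat_align_dicts := by
  intro aldict1 aldict2 _
  unfold Spec_cat_align_dicts
  exact cat_align_dicts_main aldict1 aldict2
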